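-- pv_equiv track=rewrite | github.com/E0min/Coding_Test | Lv.1 연습문제/부족한 금액 계산하기.py | solution
-- ===== SOURCE A (Python) =====
-- def solution(price, money, count):
--     total_price = 0
--     for i in range(1, count+1):
--         total_price = total_price + i*price
--     if money>total_price:
--         return 0
--     else:
--         return total_price - money
-- ===== SOURCE B (Python) =====
-- def solution(price, money, count):
--     n = count if count > 0 else 0
--     total = price * n * (n + 1) // 2
--     return max(total - money, 0)
-- ===== Notes on version B (the rewrite author's own statement) =====
-- stated objective: faster
-- what changed: Replaces the O(count) accumulation loop by the closed-form arithmetic-series total price*n*(n+1)//2 and a max for the clamp.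
import Mathlib
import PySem

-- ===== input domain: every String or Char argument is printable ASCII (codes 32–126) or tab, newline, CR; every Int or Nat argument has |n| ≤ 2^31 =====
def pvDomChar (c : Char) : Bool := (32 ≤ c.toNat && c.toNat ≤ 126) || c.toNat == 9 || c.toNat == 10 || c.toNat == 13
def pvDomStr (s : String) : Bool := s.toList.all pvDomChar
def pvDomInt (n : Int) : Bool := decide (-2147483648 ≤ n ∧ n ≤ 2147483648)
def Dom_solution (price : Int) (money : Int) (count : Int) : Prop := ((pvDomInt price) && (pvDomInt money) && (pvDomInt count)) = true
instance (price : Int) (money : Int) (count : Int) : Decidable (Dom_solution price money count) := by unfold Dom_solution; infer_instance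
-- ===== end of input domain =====

-- B replaces A's O(count) accumulation loop by the closed-form series total price*n*(n+1)//2 (faster, asymptotic).

-- ===== PORT A =====
def solution (price : Int) (money : Int) (count : Int) : Int :=
  let total_price := (PySem.List.pyRange 1 (count + 1) 1).foldl (fun t i => t + i * price) 0
  if money > total_price then 0 else total_price - money

-- ===== PORT B =====
def solution_alt (price : Int) (money : Int) (count : Int) : Int :=
  let n := if count > 0 then count else 0
  let total := PySem.Int.floordiv (price * n * (n + 1)) 2
  max (total - money) 0

-- ===== PRECONDITION & SPEC =====
def Spec_solution (price : Int) (money : Int) (count : Int) (out : Int) : Prop := out = solution_alt price money count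
instance (price : Int) (money : Int) (count : Int) (out : Int) : Decidable (Spec_solution price money count out) := by unfold Spec_solution; infer_instance

-- ===== CLAIM (what is proved, stated in full; the proofs are below) =====
def Claim_equal_solution : Prop := ∀ (price : Int) (money : Int) (count : Int), Dom_solution price money count → Spec_solution price money count (solution price money count)

-- ===== LEMMAS AND PROOFS =====

-- Doubling A's loop total gives the closed-form product price*n*(n+1).
theorem pvLoopDouble (price : Int) : ∀ (n : Nat) (acc : Int),
    2 * ((PySem.List.pyRange 1 ((n : Int) + 1) 1).foldl (fun t i => t + i * price) acc)
      = 2 * acc + price * n * (n + 1) := by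
  intro n
  induction n with
  | zero => intro acc; simp [PySem.List.pyRange_one_eq_nil]
  | succ k ih =>
    intro acc
    have hsplit : PySem.List.pyRange 1 ((k : Int) + 1 + 1) 1
        = PySem.List.pyRange 1 ((k : Int) + 1) 1 ++ [(k : Int) + 1] :=
      PySem.List.pyRange_one_succ_right (by omega)
    push_cast
    rw [hsplit, List.foldl_append]
    simp only [List.foldl_cons, List.foldl_nil]
    have h := ih acc
    push_cast at h
    linear_combination h

theorem solution_spec : Claim_equal_solution := by
  unfold Claim_equal_solution
  intro price money count _
  unfold Spec_solution solution solution_alt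
  by_cases hc : count > 0
  · have hn : ((count.toNat : Int)) = count := Int.toNat_of_nonneg (le_of_lt hc)
    have h := pvLoopDouble price count.toNat 0
    rw [hn] at h
    simp only [if_pos hc]
    set t := (PySem.List.pyRange 1 (count + 1) 1).foldl (fun t i => t + i * price) 0 with ht
    have h2 : price * count * (count + 1) = 2 * t := by omega
    have h3 : PySem.Int.floordiv (price * count * (count + 1)) 2 = t := by
      rw [h2]
      simp only [PySem.Int.floordiv]
      exact Int.mul_fdiv_cancel_left t (by norm_num)
    rw [h3]
    omega
  · have hnil : PySem.List.pyRange 1 (count + 1) 1 = [] :=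
      PySem.List.pyRange_one_eq_nil (by omega)
    simp only [hnil, List.foldl_nil, if_neg hc]
    simp [PySem.Int.floordiv]
    omega
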